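-- pv_equiv track=rewrite | github.com/Arsen1302/Code-copy-detector | TestData/solutions/problem_1062_4.py | solution_1062_4
-- ===== SOURCE A (Python) =====
-- def solution_1062_4(s: str) -> int:
--     n = len(s)
--
--     ones = s.count('1')
--
--     if ones % 3 != 0:
--         return 0
--     if ones == 0:
--         return (n-1)*(n-2)//2 % (10**9+7)
--
--     # now ones % 3 ==0, ones >= 3
--     k = ones//3
--     idx = []
--     total_idx = []
--     t = 0
--     for i in range(n):
--         if s[i] == '1':
--             t += 1
--             total_idx.append(i)
--             if t == k or t == 2*k or t == ones:
--                 idx.append(i)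
--
--     res = 1
--     idx.pop()
--     idx = set(idx)
--     for i in range(len(total_idx)):
--         if total_idx[i] in idx:
--             res = res * (total_idx[i+1]-total_idx[i]) % (10**9+7)
--     return res % (10**9+7)
-- ===== SOURCE B (Python) =====
-- def solution_1062_4(s: str) -> int:
--     n = len(s)
--     pos = [i for i, c in enumerate(s) if c == '1']
--     ones = len(pos)
--     if ones % 3 != 0:
--         return 0
--     if ones == 0:
--         return (n - 1) * (n - 2) // 2 % (10**9 + 7)
--     k = ones // 3
--     return (pos[k] - pos[k - 1]) * (pos[2 * k] - pos[2 * k - 1]) % (10**9 + 7)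
-- ===== Notes on version B (the rewrite author's own statement) =====
-- stated objective: simpler
-- what changed: B drops A's boundary-index collection, pop, set conversion and membership-filtered second scan over every one-position, and instead builds the list of positions of ones once and returns the product of the two directly indexed gaps pos[k]-pos[k-1] and pos[2k]-pos[2k-1] modulo 10**9+7.
import Mathlib
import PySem

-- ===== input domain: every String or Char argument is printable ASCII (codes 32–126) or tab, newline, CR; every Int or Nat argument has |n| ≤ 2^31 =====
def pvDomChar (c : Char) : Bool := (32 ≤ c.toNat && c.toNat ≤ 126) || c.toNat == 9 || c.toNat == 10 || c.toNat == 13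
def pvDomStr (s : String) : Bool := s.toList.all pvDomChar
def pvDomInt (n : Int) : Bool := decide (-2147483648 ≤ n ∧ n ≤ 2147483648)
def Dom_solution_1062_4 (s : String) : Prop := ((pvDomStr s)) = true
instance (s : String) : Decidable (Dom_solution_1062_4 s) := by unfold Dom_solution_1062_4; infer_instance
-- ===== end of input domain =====

-- B replaces A's boundary-index collection, pop, set conversion and membership-filtered second
-- scan by one comprehension of '1' positions and two direct indexed gap computations (objective: simpler).

-- ===== PORT A =====
def solution_1062_4 (s : String) : Int :=
  let n : Int := PySem.Str.len s
  let ones : Int := (PySem.Str.count s "1" : Int)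
  if PySem.Int.mod ones 3 ≠ 0 then 0
  else if ones = 0 then PySem.Int.mod (PySem.Int.floordiv ((n - 1) * (n - 2)) 2) (10 ^ 9 + 7)
  else
    let k := PySem.Int.floordiv ones 3
    let st :=
      (PySem.List.pyRange 0 n 1).foldl
        (fun (st : Int × List Int × List Int) i =>
          match PySem.Str.pyGet? s i with
          | some c =>
            if c == '1' then
              let t := st.1 + 1
              let total_idx := st.2.1 ++ [i]
              if t = k ∨ t = 2 * k ∨ t = ones then (t, total_idx, st.2.2 ++ [i])
              else (t, total_idx, st.2.2)
            else st
          | none => st)  -- unreachable: i ∈ range(n) is a valid index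
        (0, [], [])
    let total_idx := st.2.1
    let idx :=
      match PySem.List.pop? st.2.2 (-1) with
      | some (_, rest) => rest
      | none => st.2.2   -- unreachable: idx holds exactly three positions here
    let idxSet : PySem.Set Int := PySem.Set.ofList idx
    let res :=
      (PySem.List.pyRange 0 (PySem.List.len total_idx) 1).foldl
        (fun res i =>
          if PySem.Set.contains idxSet (PySem.List.pyGetD total_idx i 0) then
            match PySem.List.pyGet? total_idx (i + 1) with
            | some v => PySem.Int.mod (res * (v - PySem.List.pyGetD total_idx i 0)) (10 ^ 9 + 7)
            | none => res  -- unreachable: the last '1' position was popped from idx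
          else res)
        1
    PySem.Int.mod res (10 ^ 9 + 7)

-- ===== PORT B =====
def solution_1062_4_alt (s : String) : Int :=
  let n : Int := PySem.Str.len s
  let pos := ((PySem.List.enumerate s.toList 0).filter (fun p => p.2 == '1')).map (fun p => p.1)
  let ones : Int := PySem.List.len pos
  if PySem.Int.mod ones 3 ≠ 0 then 0
  else if ones = 0 then PySem.Int.mod (PySem.Int.floordiv ((n - 1) * (n - 2)) 2) (10 ^ 9 + 7)
  else
    let k := PySem.Int.floordiv ones 3
    PySem.Int.mod
      ((PySem.List.pyGetD pos k 0 - PySem.List.pyGetD pos (k - 1) 0) *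
        (PySem.List.pyGetD pos (2 * k) 0 - PySem.List.pyGetD pos (2 * k - 1) 0))
      (10 ^ 9 + 7)

-- ===== PRECONDITION & SPEC =====
def Spec_solution_1062_4 (s : String) (out : Int) : Prop := out = solution_1062_4_alt s
instance (s : String) (out : Int) : Decidable (Spec_solution_1062_4 s out) := by unfold Spec_solution_1062_4; infer_instance

-- ===== CLAIM (what is proved, stated in full; the proofs are below) =====
def Claim_equal_solution_1062_4 : Prop := ∀ (s : String), Dom_solution_1062_4 s → Spec_solution_1062_4 s (solution_1062_4 s)

-- ===== LEMMAS AND PROOFS =====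

-- count.go with a single-character needle is List.count
theorem count_go_one (c : Char) (l : List Char) : ∀ (fuel acc : Nat), l.length ≤ fuel →
    PySem.Chars.count.go [c] fuel l acc = acc + l.count c := by
  induction l with
  | nil =>
    intro fuel acc _
    cases fuel <;> simp [PySem.Chars.count.go]
  | cons h t ih =>
    intro fuel acc hf
    cases fuel with
    | zero => simp at hf
    | succ m =>
      rw [PySem.Chars.count.go.eq_def]
      dsimp only
      simp only [List.length_cons] at hf
      by_cases hc : c = h
      · subst hc
        rw [if_pos (by simp [List.isPrefixOf])]
        simp only [List.length_cons, List.length_nil, Nat.zero_add, List.drop_succ_cons,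
          List.drop_zero]
        rw [ih m (acc + 1) (by omega)]
        simp [List.count_cons]
        omega
      · rw [if_neg (by simp [List.isPrefixOf]; intro habs; exact hc habs)]
        rw [ih m acc (by omega)]
        have : (h == c) = false := by simp; intro habs; exact hc habs.symm
        simp [List.count_cons, this]

theorem chars_count_one (cs : List Char) : PySem.Chars.count cs ['1'] = cs.count '1' := by
  rw [PySem.Chars.count, if_neg (by simp), count_go_one '1' cs cs.length 0 le_rfl]
  exact Nat.zero_add _

-- the list of positions of '1', exactly as B builds it
def pvPos (cs : List Char) : List Int :=
  ((PySem.List.enumerate cs 0).filter (fun p => p.2 == '1')).map (fun p => p.1)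

theorem length_filter_enum (cs : List Char) : ∀ (r : Int),
    ((PySem.List.enumerate cs r).filter (fun p => p.2 == '1')).length = cs.count '1' := by
  induction cs with
  | nil => intro r; simp [PySem.List.enumerate_nil]
  | cons h t ih =>
    intro r
    rw [PySem.List.enumerate_cons]
    by_cases hc : h = '1' <;> simp [List.count_cons, hc, ih]

theorem pvPos_length (cs : List Char) : (pvPos cs).length = cs.count '1' := by
  simp [pvPos, length_filter_enum]

theorem pvPos_pairwise (cs : List Char) : (pvPos cs).Pairwise (· < ·) := by
  unfold pvPos
  exact List.Pairwise.map _ (fun a b h => h)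
    (List.Pairwise.filter _ (PySem.List.pairwise_lt_enumerate cs 0))

-- one '1'-step of A's first loop
def pvStep (k ones : Int) (st : Int × List Int × List Int) (i : Int) : Int × List Int × List Int :=
  (st.1 + 1, st.2.1 ++ [i],
    if st.1 + 1 = k ∨ st.1 + 1 = 2 * k ∨ st.1 + 1 = ones then st.2.2 ++ [i] else st.2.2)

theorem foldl_filter_step {γ : Type} (g : γ → Int → γ) (L : List (Int × Char)) : ∀ (st : γ),
    L.foldl (fun st p => if (p.2 == '1') = true then g st p.1 else st) st
      = ((L.filter (fun p => p.2 == '1')).map (fun p => p.1)).foldl g st := by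
  induction L with
  | nil => intro st; simp
  | cons p L ih =>
    intro st
    rw [List.foldl_cons, List.filter_cons]
    by_cases h : (p.2 == '1') = true
    · rw [if_pos h, if_pos h, List.map_cons, List.foldl_cons, ih]
    · rw [if_neg h, if_neg h, ih]

theorem foldl_pvStep (k ones : Int) (Q : List Int) : ∀ (t : Int) (total idx : List Int),
    Q.foldl (pvStep k ones) (t, total, idx)
      = (t + Q.length, total ++ Q,
         idx ++ ((PySem.List.enumerate Q (t + 1)).filter
             (fun p => decide (p.1 = k ∨ p.1 = 2 * k ∨ p.1 = ones))).map (fun p => p.2)) := by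
  induction Q with
  | nil => intro t total idx; simp [PySem.List.enumerate_nil]
  | cons q Q ih =>
    intro t total idx
    rw [List.foldl_cons, PySem.List.enumerate_cons]
    show Q.foldl (pvStep k ones) (pvStep k ones (t, total, idx) q) = _
    simp only [pvStep]
    by_cases h : t + 1 = k ∨ t + 1 = 2 * k ∨ t + 1 = ones
    · rw [if_pos h, ih, List.filter_cons, if_pos (by simpa using h)]
      simp [Prod.ext_iff, List.append_assoc]
      push_cast; ring
    · rw [if_neg h, ih, List.filter_cons, if_neg (by simpa using h)]
      simp [Prod.ext_iff, List.append_assoc]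
      push_cast; ring

theorem filter_enumerate_nil (cond : Int × Int → Bool) (Q : List Int) : ∀ (r : Int),
    (∀ (j q : Int), r ≤ j → j < r + Q.length → cond (j, q) = false) →
    (PySem.List.enumerate Q r).filter cond = [] := by
  induction Q with
  | nil => intro r _; simp [PySem.List.enumerate_nil]
  | cons q Q ih =>
    intro r h
    rw [PySem.List.enumerate_cons, List.filter_cons]
    have hr : cond (r, q) = false := h r q le_rfl (by simp only [List.length_cons]; push_cast; omega)
    simp only [hr, Bool.false_eq_true, if_false]
    exact ih (r + 1) (fun j p h1 h2 => h j p (by omega)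
      (by simp only [List.length_cons] at *; push_cast at *; omega))

-- a foldl that does nothing on a stretch of indices
theorem foldl_id_of_mem {α β : Type} (l : List α) (f : β → α → β) (init : β)
    (h : ∀ (acc : β), ∀ x ∈ l, f acc x = acc) : l.foldl f init = init := by
  rw [PySem.List.foldl_congr_mem l f (fun acc _ => acc) init h]
  exact List.foldl_fixed l

-- the boundary positions A collects, when there are 3*kk ones
theorem pick_eq (P : List Int) (kk : Nat) (hkk : 1 ≤ kk) (hlen : P.length = 3 * kk)
    (h1 : kk - 1 < P.length) (h2 : 2 * kk - 1 < P.length) (h3 : 3 * kk - 1 < P.length) :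
    ((PySem.List.enumerate P 1).filter
        (fun p => decide (p.1 = (kk : Int) ∨ p.1 = 2 * (kk : Int) ∨ p.1 = 3 * (kk : Int)))).map
        (fun p => p.2)
      = [P[kk - 1]'h1, P[2 * kk - 1]'h2, P[3 * kk - 1]'h3] := by
  have l1 : (P.take (kk - 1)).length = kk - 1 := by rw [List.length_take]; omega
  have hdd1 : (P.drop kk).drop (kk - 1) = P.drop (2 * kk - 1) := by
    have e : kk + (kk - 1) = 2 * kk - 1 := by omega
    rw [List.drop_drop, e]
  have hdd2 : (P.drop (2 * kk)).drop (kk - 1) = P.drop (3 * kk - 1) := by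
    have e : 2 * kk + (kk - 1) = 3 * kk - 1 := by omega
    rw [List.drop_drop, e]
  have l2 : ((P.drop kk).take (kk - 1)).length = kk - 1 := by
    rw [List.length_take, List.length_drop]; omega
  have l3 : ((P.drop (2 * kk)).take (kk - 1)).length = kk - 1 := by
    rw [List.length_take, List.length_drop]; omega
  have hd1 : P.drop (kk - 1) = P[kk - 1]'h1 :: P.drop kk := by
    have e : kk - 1 + 1 = kk := by omega
    rw [List.drop_eq_getElem_cons h1, e]
  have hd2 : P.drop (2 * kk - 1) = P[2 * kk - 1]'h2 :: P.drop (2 * kk) := by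
    have e : 2 * kk - 1 + 1 = 2 * kk := by omega
    rw [List.drop_eq_getElem_cons h2, e]
  have hd3 : P.drop (3 * kk - 1) = [P[3 * kk - 1]'h3] := by
    rw [List.drop_eq_getElem_cons h3, List.drop_eq_nil_of_le (by omega)]
  have hsplit : P = P.take (kk - 1) ++ (P[kk - 1]'h1 ::
      ((P.drop kk).take (kk - 1) ++ (P[2 * kk - 1]'h2 ::
        ((P.drop (2 * kk)).take (kk - 1) ++ [P[3 * kk - 1]'h3])))) := by
    conv_lhs => rw [← List.take_append_drop (kk - 1) P, hd1]
    congr 2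
    conv_lhs => rw [← List.take_append_drop (kk - 1) (P.drop kk), hdd1, hd2]
    congr 2
    conv_lhs => rw [← List.take_append_drop (kk - 1) (P.drop (2 * kk)), hdd2, hd3]
  conv_lhs => rw [hsplit]
  rw [PySem.List.enumerate_append, PySem.List.enumerate_cons, PySem.List.enumerate_append,
    PySem.List.enumerate_cons, PySem.List.enumerate_append, PySem.List.enumerate_cons,
    PySem.List.enumerate_nil, l1, l2, l3]
  have s3 : (1:Int) + ↑(kk - 1) + 1 + ↑(kk - 1) + 1 + ↑(kk - 1) = 3 * (kk:Int) := by omega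
  have s2 : (1:Int) + ↑(kk - 1) + 1 + ↑(kk - 1) = 2 * (kk:Int) := by omega
  have s1 : (1:Int) + ↑(kk - 1) = (kk:Int) := by omega
  rw [s3, s2, s1]
  have e1 : List.filter (fun p => decide (p.1 = (kk:Int) ∨ p.1 = 2 * (kk:Int) ∨ p.1 = 3 * (kk:Int)))
      (PySem.List.enumerate (List.take (kk - 1) P) 1) = [] :=
    filter_enumerate_nil _ _ 1 (fun j q hj1 hj2 => by
      rw [l1] at hj2; simp only [decide_eq_false_iff_not]; omega)
  have e2 : List.filter (fun p => decide (p.1 = (kk:Int) ∨ p.1 = 2 * (kk:Int) ∨ p.1 = 3 * (kk:Int)))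
      (PySem.List.enumerate (List.take (kk - 1) (List.drop kk P)) ((kk:Int) + 1)) = [] :=
    filter_enumerate_nil _ _ _ (fun j q hj1 hj2 => by
      rw [l2] at hj2; simp only [decide_eq_false_iff_not]; omega)
  have e3 : List.filter (fun p => decide (p.1 = (kk:Int) ∨ p.1 = 2 * (kk:Int) ∨ p.1 = 3 * (kk:Int)))
      (PySem.List.enumerate (List.take (kk - 1) (List.drop (2 * kk) P)) (2 * (kk:Int) + 1)) = [] :=
    filter_enumerate_nil _ _ _ (fun j q hj1 hj2 => by
      rw [l3] at hj2; simp only [decide_eq_false_iff_not]; omega)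
  rw [List.filter_append, e1, List.nil_append, List.filter_cons, if_pos (by simp),
    List.filter_append, e2, List.nil_append, List.filter_cons, if_pos (by simp),
    List.filter_append, e3, List.nil_append, List.filter_cons, if_pos (by simp),
    List.filter_nil]
  simp

-- A's first loop, seen over the positions of '1'
theorem loopA_eq (s : String) (k ones : Int) :
    List.foldl (fun (st : Int × List Int × List Int) i =>
        match PySem.Str.pyGet? s i with
        | some c =>
          if (c == '1') = true then
            if st.1 + 1 = k ∨ st.1 + 1 = 2 * k ∨ st.1 + 1 = ones
            then (st.1 + 1, st.2.1 ++ [i], st.2.2 ++ [i]) else (st.1 + 1, st.2.1 ++ [i], st.2.2)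
          else st
        | none => st) (0, [], []) (PySem.List.pyRange 0 ↑s.toList.length)
      = ((s.toList.count '1' : Int), pvPos s.toList,
         ((PySem.List.enumerate (pvPos s.toList) 1).filter
             (fun p => decide (p.1 = k ∨ p.1 = 2 * k ∨ p.1 = ones))).map (fun p => p.2)) := by
  rw [PySem.List.foldl_congr_mem _ _
    (fun (st : Int × List Int × List Int) j =>
      if (PySem.List.pyGetD s.toList j ' ' == '1') = true then pvStep k ones st j else st) _
    (fun acc x hx => by
      obtain ⟨hx0, hx1⟩ := PySem.List.mem_pyRange_one.mp hx
      have hget : PySem.Str.pyGet? s x = some (s.toList[x.toNat]'(by omega)) := by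
        show PySem.Chars.pyGet? s.toList x = _
        rw [PySem.Chars.pyGet?_eq_listPyGet?, PySem.List.pyGet?_eq_some_getElem _ hx0 (by omega)]
      rw [hget]
      dsimp only
      rw [PySem.List.pyGetD_eq_getElem _ _ hx0 (by omega)]
      by_cases hc : (s.toList[x.toNat]'(by omega) == '1') = true
      · rw [if_pos hc, if_pos hc]
        show _ = pvStep k ones acc x
        rw [pvStep]
        by_cases hcond : acc.1 + 1 = k ∨ acc.1 + 1 = 2 * k ∨ acc.1 + 1 = ones
        · rw [if_pos hcond, if_pos hcond]
        · rw [if_neg hcond, if_neg hcond]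
      · rw [if_neg hc, if_neg hc])]
  have hen : PySem.List.enumerate s.toList 0
      = (PySem.List.pyRange 0 ↑s.toList.length).map (fun j => (j, PySem.List.pyGetD s.toList j ' ')) := by
    have := PySem.List.enumerate_eq_map_pyRange s.toList ' '
    simpa [PySem.List.len_eq] using this
  have hstep : (PySem.List.enumerate s.toList 0).foldl
      (fun (st : Int × List Int × List Int) p =>
        if (p.2 == '1') = true then pvStep k ones st p.1 else st) (0, [], [])
      = List.foldl (fun (st : Int × List Int × List Int) j =>
          if (PySem.List.pyGetD s.toList j ' ' == '1') = true then pvStep k ones st j else st)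
          (0, [], []) (PySem.List.pyRange 0 ↑s.toList.length) := by
    rw [hen, List.foldl_map]
  rw [← hstep, foldl_filter_step (pvStep k ones)]
  rw [show ((PySem.List.enumerate s.toList 0).filter (fun p => p.2 == '1')).map (fun p => p.1)
      = pvPos s.toList from rfl]
  rw [foldl_pvStep]
  simp [pvPos_length]

-- the modulus bookkeeping of A's result vs B's single reduction
theorem pvmod_final (g1 g2 : Int) :
    PySem.Int.mod (PySem.Int.mod (PySem.Int.mod (1 * g1) (10 ^ 9 + 7) * g2) (10 ^ 9 + 7)) (10 ^ 9 + 7)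
      = PySem.Int.mod (g1 * g2) (10 ^ 9 + 7) := by
  have hM : (0:Int) ≤ 10 ^ 9 + 7 := by norm_num
  simp only [PySem.Int.mod, Int.fmod_eq_emod, if_pos (Or.inl hM), add_zero, one_mul]
  conv_lhs => rw [Int.emod_emod_of_dvd _ dvd_rfl, Int.mul_emod]
  rw [Int.emod_emod_of_dvd _ dvd_rfl, ← Int.mul_emod]

-- A's second loop: only the two stored boundary positions contribute
theorem loopB_eq (P : List Int) (kk : Nat) (hkk : 1 ≤ kk) (hlen : P.length = 3 * kk)
    (hpw : P.Pairwise (· < ·)) :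
    List.foldl (fun res i =>
        if (PySem.Set.ofList [P[kk - 1]'(by omega), P[2 * kk - 1]'(by omega)]).contains
            (PySem.List.pyGetD P i 0) = true then
          match PySem.List.pyGet? P (i + 1) with
          | some v => PySem.Int.mod (res * (v - PySem.List.pyGetD P i 0)) (10 ^ 9 + 7)
          | none => res
        else res) 1 (PySem.List.pyRange 0 ↑P.length)
      = PySem.Int.mod
          (PySem.Int.mod (1 * (P[kk]'(by omega) - P[kk - 1]'(by omega))) (10 ^ 9 + 7)
            * (P[2 * kk]'(by omega) - P[2 * kk - 1]'(by omega))) (10 ^ 9 + 7) := by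
  have hnd : P.Nodup := hpw.imp ne_of_lt
  have hb1 : kk - 1 < P.length := by omega
  have hb2 : 2 * kk - 1 < P.length := by omega
  have hx12 : P[kk - 1]'hb1 < P[2 * kk - 1]'hb2 :=
    List.pairwise_iff_getElem.mp hpw _ _ _ _ (by omega)
  have hset : PySem.Set.ofList [P[kk - 1]'hb1, P[2 * kk - 1]'hb2]
      = [P[kk - 1]'hb1, P[2 * kk - 1]'hb2] := by
    simp [PySem.Set.ofList, PySem.Set.add, PySem.Set.contains, PySem.Set.empty, hx12.ne']
  rw [hset]
  have hmem : ∀ (i : Int), 0 ≤ i → i < ↑P.length →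
      (PySem.Set.contains [P[kk - 1]'hb1, P[2 * kk - 1]'hb2] (PySem.List.pyGetD P i 0) = true
        ↔ (i.toNat = kk - 1 ∨ i.toNat = 2 * kk - 1)) := by
    intro i h0 h1
    rw [PySem.List.pyGetD_eq_getElem _ _ h0 h1, PySem.Set.contains, List.contains_iff_mem]
    simp only [List.mem_cons, List.not_mem_nil, or_false]
    constructor
    · rintro (h | h)
      · exact Or.inl ((List.Nodup.getElem_inj_iff hnd).mp h)
      · exact Or.inr ((List.Nodup.getElem_inj_iff hnd).mp h)
    · rintro (h | h)
      · exact Or.inl (by simp only [h])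
      · exact Or.inr (by simp only [h])
  have hL : (↑P.length : Int) = 3 * (kk : Int) := by rw [hlen]; push_cast; ring
  -- the loop body does nothing on indices away from the two boundaries
  have idle : ∀ (a b init : Int), 0 ≤ a → b ≤ ↑P.length →
      (∀ j : Int, a ≤ j → j < b → ¬(j.toNat = kk - 1 ∨ j.toNat = 2 * kk - 1)) →
      List.foldl (fun res i =>
        if PySem.Set.contains [P[kk - 1]'hb1, P[2 * kk - 1]'hb2] (PySem.List.pyGetD P i 0) = true then
          match PySem.List.pyGet? P (i + 1) with
          | some v => PySem.Int.mod (res * (v - PySem.List.pyGetD P i 0)) (10 ^ 9 + 7)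
          | none => res
        else res) init (PySem.List.pyRange a b) = init := by
    intro a b init ha hb hj
    refine foldl_id_of_mem _ _ _ (fun acc x hx => ?_)
    obtain ⟨h0, h1⟩ := PySem.List.mem_pyRange_one.mp hx
    have hfalse : PySem.Set.contains [P[kk - 1]'hb1, P[2 * kk - 1]'hb2] (PySem.List.pyGetD P x 0) = false := by
      rw [Bool.eq_false_iff]
      intro ht
      exact hj x h0 h1 ((hmem x (le_trans ha h0) (by omega)).mp ht)
    rw [hfalse]
    simp
  -- evaluate the body at the two boundary indices
  have active : ∀ (j : Nat) (init : Int) (hA : j + 1 < P.length) (hB : j < P.length),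
      (j = kk - 1 ∨ j = 2 * kk - 1) →
      (fun res i =>
        if PySem.Set.contains [P[kk - 1]'hb1, P[2 * kk - 1]'hb2] (PySem.List.pyGetD P i 0) = true then
          match PySem.List.pyGet? P (i + 1) with
          | some v => PySem.Int.mod (res * (v - PySem.List.pyGetD P i 0)) (10 ^ 9 + 7)
          | none => res
        else res) init (↑j)
      = PySem.Int.mod (init * (P[j + 1]'hA - P[j]'hB)) (10 ^ 9 + 7) := by
    intro j init hj1 hjB hj2
    dsimp only
    have htrue : PySem.Set.contains [P[kk - 1]'hb1, P[2 * kk - 1]'hb2] (PySem.List.pyGetD P (↑j) 0) = true := by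
      refine (hmem (↑j) (by omega) (by omega)).mpr ?_
      simpa using hj2
    rw [htrue, if_pos rfl]
    have hg : PySem.List.pyGet? P ((↑j : Int) + 1) = some (P[j + 1]'(by omega)) := by
      have : ((↑j : Int) + 1) = ((j + 1 : Nat) : Int) := by push_cast; ring
      rw [this, PySem.List.pyGet?_natCast, List.getElem?_eq_getElem hj1]
    rw [hg]
    have hgd : PySem.List.pyGetD P (↑j) 0 = P[j]'(by omega) := by
      rw [PySem.List.pyGetD_eq_getElem _ _ (by omega) (by omega)]
      simp
    rw [hgd]
  -- split the index range at the two boundaries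
  rw [hL,
    PySem.List.pyRange_one_append 0 ((kk : Int) - 1) (3 * (kk : Int)) (by omega) (by omega),
    List.foldl_append,
    PySem.List.pyRange_one_cons (show ((kk : Int) - 1) < 3 * (kk : Int) by omega),
    List.foldl_cons]
  have e1 : ((kk : Int) - 1) + 1 = (kk : Int) := by ring
  rw [e1,
    PySem.List.pyRange_one_append (kk : Int) (2 * (kk : Int) - 1) (3 * (kk : Int)) (by omega)
      (by omega),
    List.foldl_append,
    PySem.List.pyRange_one_cons (show (2 * (kk : Int) - 1) < 3 * (kk : Int) by omega),
    List.foldl_cons]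
  have e2 : (2 * (kk : Int) - 1) + 1 = 2 * (kk : Int) := by ring
  rw [e2]
  rw [idle 0 ((kk : Int) - 1) 1 le_rfl (by omega) (fun j hj1 hj2 => by omega),
    idle (kk : Int) (2 * (kk : Int) - 1) _ (by omega) (by omega) (fun j hj1 hj2 => by omega),
    idle (2 * (kk : Int)) (3 * (kk : Int)) _ (by omega) (by omega) (fun j hj1 hj2 => by omega)]
  have t1 : PySem.Set.contains [P[kk - 1]'hb1, P[2 * kk - 1]'hb2]
      (PySem.List.pyGetD P ((kk : Int) - 1) 0) = true :=
    (hmem _ (by omega) (by omega)).mpr (by left; omega)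
  have t2 : PySem.Set.contains [P[kk - 1]'hb1, P[2 * kk - 1]'hb2]
      (PySem.List.pyGetD P (2 * (kk : Int) - 1) 0) = true :=
    (hmem _ (by omega) (by omega)).mpr (by right; omega)
  have g1 : PySem.List.pyGet? P ((kk : Nat) : Int) = some (P[kk]'(by omega)) := by
    rw [PySem.List.pyGet?_natCast, List.getElem?_eq_getElem (by omega)]
  have g2 : PySem.List.pyGet? P (2 * ((kk : Nat) : Int)) = some (P[2 * kk]'(by omega)) := by
    have e : (2 * ((kk : Nat) : Int)) = ((2 * kk : Nat) : Int) := by push_cast; ring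
    rw [e, PySem.List.pyGet?_natCast, List.getElem?_eq_getElem (by omega)]
  have p1 : PySem.List.pyGetD P ((kk : Int) - 1) 0 = P[kk - 1]'hb1 := by
    rw [PySem.List.pyGetD_eq_getElem _ _ (by omega) (by omega)]
    congr 1
    omega
  have p2 : PySem.List.pyGetD P (2 * (kk : Int) - 1) 0 = P[2 * kk - 1]'hb2 := by
    rw [PySem.List.pyGetD_eq_getElem _ _ (by omega) (by omega)]
    congr 1
    omega
  simp [t1, t2, g1, g2, p1, p2]

theorem main_equiv (s : String) : solution_1062_4 s = solution_1062_4_alt s := by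
  have hcount : PySem.Str.count s "1" = s.toList.count '1' := by
    rw [PySem.Str.count_eq]; exact chars_count_one s.toList
  have hlenpos := pvPos_length s.toList
  simp only [solution_1062_4, solution_1062_4_alt, PySem.Str.len_eq, PySem.List.len_eq, hcount]
  rw [show ((PySem.List.enumerate s.toList 0).filter (fun p => p.2 == '1')).map (fun p => p.1)
      = pvPos s.toList from rfl, hlenpos]
  by_cases hm : PySem.Int.mod (↑(s.toList.count '1')) 3 ≠ 0
  · rw [if_pos hm, if_pos hm]
  · rw [if_neg hm, if_neg hm]
    by_cases hz : ((s.toList.count '1' : Nat) : Int) = 0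
    · rw [if_pos hz, if_pos hz]
    · rw [if_neg hz, if_neg hz]
      have hm0 : PySem.Int.mod (↑(s.toList.count '1')) 3 = 0 := not_ne_iff.mp hm
      have hemod : ((s.toList.count '1' : Nat) : Int) % 3 = 0 := by
        have := hm0
        simp only [PySem.Int.mod, Int.fmod_eq_emod] at this
        omega
      obtain ⟨kk, hc3⟩ : ∃ kk, s.toList.count '1' = 3 * kk :=
        ⟨s.toList.count '1' / 3, by omega⟩
      have hkk : 1 ≤ kk := by omega
      have hplen : (pvPos s.toList).length = 3 * kk := by rw [hlenpos]; exact hc3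
      rw [loopA_eq s (PySem.Int.floordiv (↑(s.toList.count '1')) 3) (↑(s.toList.count '1'))]
      have hfd : PySem.Int.floordiv (↑(s.toList.count '1')) 3 = ((kk : Nat) : Int) := by
        simp only [PySem.Int.floordiv, Int.fdiv_eq_ediv]
        omega
      have hc3' : ((s.toList.count '1' : Nat) : Int) = 3 * ((kk : Nat) : Int) := by omega
      rw [hfd, hc3']
      rw [pick_eq (pvPos s.toList) kk hkk hplen (by omega) (by omega) (by omega)]
      rw [show [(pvPos s.toList)[kk - 1]'(by omega), (pvPos s.toList)[2 * kk - 1]'(by omega),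
            (pvPos s.toList)[3 * kk - 1]'(by omega)]
          = [(pvPos s.toList)[kk - 1]'(by omega), (pvPos s.toList)[2 * kk - 1]'(by omega)]
            ++ [(pvPos s.toList)[3 * kk - 1]'(by omega)] from rfl]
      rw [PySem.List.pop?_last]
      rw [loopB_eq (pvPos s.toList) kk hkk hplen (pvPos_pairwise s.toList)]
      rw [pvmod_final]
      have q1 : PySem.List.pyGetD (pvPos s.toList) ((kk : Nat) : Int) 0
          = (pvPos s.toList)[kk]'(by omega) := by
        rw [PySem.List.pyGetD_eq_getElem _ _ (by omega) (by omega)]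
        congr 1
      have q2 : PySem.List.pyGetD (pvPos s.toList) (((kk : Nat) : Int) - 1) 0
          = (pvPos s.toList)[kk - 1]'(by omega) := by
        rw [PySem.List.pyGetD_eq_getElem _ _ (by omega) (by omega)]
        congr 1
        omega
      have q3 : PySem.List.pyGetD (pvPos s.toList) (2 * ((kk : Nat) : Int)) 0
          = (pvPos s.toList)[2 * kk]'(by omega) := by
        rw [PySem.List.pyGetD_eq_getElem _ _ (by omega) (by omega)]
        congr 1
      have q4 : PySem.List.pyGetD (pvPos s.toList) (2 * ((kk : Nat) : Int) - 1) 0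
          = (pvPos s.toList)[2 * kk - 1]'(by omega) := by
        rw [PySem.List.pyGetD_eq_getElem _ _ (by omega) (by omega)]
        congr 1
        omega
      rw [q1, q2, q3, q4]

-- ===== VERDICT (by name: the statement is the Claim_ definition above) =====
theorem solution_1062_4_spec : Claim_equal_solution_1062_4 := by
  intro s _
  unfold Spec_solution_1062_4
  exact main_equiv s
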